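-- pv_equiv track=rewrite | github.com/JuanpiRossi/metegolBotTelegram | utilities.py | _get_elo_constants
-- ===== SOURCE A (Python) =====
-- def _get_elo_constants(elo_player,constant_array=[]):
--     if not constant_array:
--         constant_array = [(600,120),(800,52),(1200,44),(2600,16),(1400,40),(1600,36),(1800,32),(1000,48),(2000,28),(2200,24),(2400,20),(2800,8),(3000,2)]
--     if type(constant_array)!=list:
--         return constant_array
--     constant_array = sorted(constant_array, key=lambda k: k[0])
--     for ele in constant_array:
--         if elo_player < ele[0]:
--             return ele[1]
--     return 1
-- ===== SOURCE B (Python) =====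
-- def _get_elo_constants(elo_player, constant_array=[]):
--     if not constant_array:
--         constant_array = [(600,120),(800,52),(1200,44),(2600,16),(1400,40),(1600,36),(1800,32),(1000,48),(2000,28),(2200,24),(2400,20),(2800,8),(3000,2)]
--     if type(constant_array)!=list:
--         return constant_array
--     sorted_array = sorted(constant_array, key=lambda k: k[0])
--     lo, hi = 0, len(sorted_array)
--     while lo < hi:
--         mid = (lo + hi) // 2
--         if sorted_array[mid][0] <= elo_player:
--             lo = mid + 1
--         else:
--             hi = mid
--     return sorted_array[lo][1] if lo < len(sorted_array) else 1
-- ===== Notes on version B (the rewrite author's own statement) =====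
-- stated objective: alternative
-- what changed: Replaces A's linear first-threshold scan over the sorted array with a hand-written binary search (bisect_right semantics) for the first strictly greater threshold.
import Mathlib
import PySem

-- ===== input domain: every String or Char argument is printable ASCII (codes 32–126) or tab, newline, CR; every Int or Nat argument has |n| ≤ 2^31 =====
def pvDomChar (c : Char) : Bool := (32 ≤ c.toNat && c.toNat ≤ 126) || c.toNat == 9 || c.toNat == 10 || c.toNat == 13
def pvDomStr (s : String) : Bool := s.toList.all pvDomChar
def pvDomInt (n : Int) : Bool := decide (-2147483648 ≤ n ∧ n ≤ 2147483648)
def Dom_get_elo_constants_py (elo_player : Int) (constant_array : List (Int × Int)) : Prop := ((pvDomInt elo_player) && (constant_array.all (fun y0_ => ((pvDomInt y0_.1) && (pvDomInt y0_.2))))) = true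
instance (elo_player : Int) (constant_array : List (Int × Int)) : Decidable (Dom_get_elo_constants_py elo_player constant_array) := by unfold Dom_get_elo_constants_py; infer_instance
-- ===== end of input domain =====

-- B replaces A's linear first-threshold scan with a binary search over the sorted array (alternative, same result).


-- ===== PORT A =====
-- the 13-pair default K-factor table (shared literal constant of both sources)
def pvDefaultTable : List (Int × Int) := [(600,120),(800,52),(1200,44),(2600,16),(1400,40),(1600,36),(1800,32),(1000,48),(2000,28),(2200,24),(2400,20),(2800,8),(3000,2)]

-- the 'for ele in constant_array: if elo_player < ele[0]: return ele[1]' loop; falls through to 1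
def pvScanA (elo_player : Int) : List (Int × Int) → Int
  | [] => 1
  | e :: t => if elo_player < e.1 then e.2 else pvScanA elo_player t

-- 'if type(constant_array)!=list: return constant_array' never fires here: the argument is always a list
def get_elo_constants_py (elo_player : Int) (constant_array : List (Int × Int)) : Int :=
  pvScanA elo_player (PySem.List.sorted (if constant_array.isEmpty then pvDefaultTable else constant_array) (fun k => k.1))

-- ===== PORT B =====
-- the hand-written 'while lo < hi' bisect_right loop of Source B (the read s[mid] is always in range: mid < hi ≤ len)
-- fuel = hi - lo bounds the iteration count (the gap strictly shrinks each pass); this only makes the loop total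
def pvBSearchFuel : Nat → List (Int × Int) → Int → Nat → Nat → Nat
  | 0, _, _, lo, _ => lo
  | n + 1, s, x, lo, hi =>
    if lo < hi then
      if (s.getD ((lo + hi) / 2) (0, 0)).1 ≤ x then pvBSearchFuel n s x ((lo + hi) / 2 + 1) hi
      else pvBSearchFuel n s x lo ((lo + hi) / 2)
    else lo

def pvBSearch (s : List (Int × Int)) (x : Int) (lo hi : Nat) : Nat :=
  pvBSearchFuel (hi - lo) s x lo hi

-- Source B's final line: 'sorted_array[lo][1] if lo < len(sorted_array) else 1' after the loop
def pvBisectPick (x : Int) (s : List (Int × Int)) : Int :=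
  if pvBSearch s x 0 s.length < s.length then (s.getD (pvBSearch s x 0 s.length) (0, 0)).2 else 1

def get_elo_constants_py_alt (elo_player : Int) (constant_array : List (Int × Int)) : Int :=
  pvBisectPick elo_player (PySem.List.sorted (if constant_array.isEmpty then pvDefaultTable else constant_array) (fun k => k.1))

-- ===== PRECONDITION & SPEC =====
def Spec_get_elo_constants_py (elo_player : Int) (constant_array : List (Int × Int)) (out : Int) : Prop := out = get_elo_constants_py_alt elo_player constant_array
instance (elo_player : Int) (constant_array : List (Int × Int)) (out : Int) : Decidable (Spec_get_elo_constants_py elo_player constant_array out) := by unfold Spec_get_elo_constants_py; infer_instance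

-- ===== CLAIM (what is proved, stated in full; the proofs are below) =====
def Claim_equal_get_elo_constants_py : Prop := ∀ (elo_player : Int) (constant_array : List (Int × Int)), Dom_get_elo_constants_py elo_player constant_array → Spec_get_elo_constants_py elo_player constant_array (get_elo_constants_py elo_player constant_array)

-- ===== LEMMAS AND PROOFS =====

-- On a list sorted by first component, '.1 ≤ x' holds exactly on the prefix of length countP.
theorem pv_prefix_char (x : Int) (s : List (Int × Int))
    (hs : s.Pairwise (fun a b => a.1 ≤ b.1)) (j : Nat) (hj : j < s.length) :
    (s[j].1 ≤ x ↔ j < s.countP (fun e => decide (e.1 ≤ x))) := by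
  induction s generalizing j with
  | nil => simp at hj
  | cons a t ih =>
    rcases List.pairwise_cons.mp hs with ⟨ha, ht⟩
    by_cases hax : a.1 ≤ x
    · cases j with
      | zero => simp [hax]
      | succ j =>
        simp only [List.length_cons] at hj
        simp only [List.getElem_cons_succ, List.countP_cons, hax]
        rw [ih ht j (by omega)]
        simp only [decide_true, if_pos]
        omega
    · have hcnt : t.countP (fun e => decide (e.1 ≤ x)) = 0 := by
        rw [List.countP_eq_zero]
        intro e he
        have := ha e he
        simp; omega
      cases j with
      | zero => simp [hax, hcnt]
      | succ j =>
        simp only [List.length_cons] at hj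
        have hje : ¬ t[j].1 ≤ x := by
          have := ha t[j] (List.getElem_mem (by omega))
          omega
        simp [hax, hcnt, hje]

-- A's scan on a sorted list returns the entry at the countP index (or 1 past the end).
theorem pv_scan_eq_countP (x : Int) (s : List (Int × Int))
    (hs : s.Pairwise (fun a b => a.1 ≤ b.1)) :
    pvScanA x s = (if h : s.countP (fun e => decide (e.1 ≤ x)) < s.length
                   then (s[s.countP (fun e => decide (e.1 ≤ x))]'h).2 else 1) := by
  induction s with
  | nil => simp [pvScanA]
  | cons a t ih =>
    rcases List.pairwise_cons.mp hs with ⟨ha, ht⟩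
    by_cases hax : x < a.1
    · have hcnt0 : (a :: t).countP (fun e => decide (e.1 ≤ x)) = 0 := by
        rw [List.countP_eq_zero]
        intro e he
        rcases List.mem_cons.mp he with rfl | he'
        · simp; omega
        · have := ha e he'; simp; omega
      simp [pvScanA, hax, hcnt0]
    · have hax' : a.1 ≤ x := by omega
      rw [show pvScanA x (a :: t) = pvScanA x t by simp [pvScanA]; omega]
      rw [ih ht]
      have hc : (a :: t).countP (fun e => decide (e.1 ≤ x)) = t.countP (fun e => decide (e.1 ≤ x)) + 1 := by
        simp [hax']
      rw [hc]
      by_cases hlt : t.countP (fun e => decide (e.1 ≤ x)) < t.length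
      · rw [dif_pos hlt, dif_pos (by simp only [List.length_cons]; omega)]
        simp
      · rw [dif_neg hlt, dif_neg (by simp only [List.length_cons]; omega)]

-- The binary-search loop converges to the countP index when it is bracketed by [lo, hi].
theorem pv_bsearch_aux (s : List (Int × Int)) (x : Int)
    (hs : s.Pairwise (fun a b => a.1 ≤ b.1)) :
    ∀ (n lo hi : Nat), hi - lo ≤ n → hi ≤ s.length →
      lo ≤ s.countP (fun e => decide (e.1 ≤ x)) → s.countP (fun e => decide (e.1 ≤ x)) ≤ hi →
      pvBSearchFuel n s x lo hi = s.countP (fun e => decide (e.1 ≤ x)) := by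
  intro n
  induction n with
  | zero =>
    intro lo hi h1 _ h3 h4
    simp only [pvBSearchFuel]
    omega
  | succ n ih =>
    intro lo hi h1 h2 h3 h4
    simp only [pvBSearchFuel]
    by_cases hlh : lo < hi
    · rw [if_pos hlh]
      have hmlen : (lo + hi) / 2 < s.length := by omega
      by_cases hmid : (s.getD ((lo + hi) / 2) (0, 0)).1 ≤ x
      · rw [if_pos hmid]
        refine ih ((lo + hi) / 2 + 1) hi (by omega) h2 ?_ h4
        rw [List.getD_eq_getElem s (0, 0) hmlen] at hmid
        have := (pv_prefix_char x s hs ((lo + hi) / 2) hmlen).mp hmid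
        omega
      · rw [if_neg hmid]
        refine ih lo ((lo + hi) / 2) (by omega) (by omega) h3 ?_
        rw [List.getD_eq_getElem s (0, 0) hmlen] at hmid
        by_contra hcon
        have : s[(lo + hi) / 2].1 ≤ x := (pv_prefix_char x s hs _ hmlen).mpr (by omega)
        omega
    · rw [if_neg hlh]
      omega

theorem pv_bsearch_eq_countP (s : List (Int × Int)) (x : Int)
    (hs : s.Pairwise (fun a b => a.1 ≤ b.1)) (lo hi : Nat)
    (hhi : hi ≤ s.length)
    (hlo : lo ≤ s.countP (fun e => decide (e.1 ≤ x)))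
    (hc : s.countP (fun e => decide (e.1 ≤ x)) ≤ hi) :
    pvBSearch s x lo hi = s.countP (fun e => decide (e.1 ≤ x)) :=
  pv_bsearch_aux s x hs (hi - lo) lo hi le_rfl hhi hlo hc

-- ===== VERDICT (by name: the statement is the Claim_ definition above) =====
theorem get_elo_constants_py_spec : Claim_equal_get_elo_constants_py := by
  intro x ca _
  unfold Spec_get_elo_constants_py get_elo_constants_py get_elo_constants_py_alt pvBisectPick
  have hs := PySem.List.sorted_pairwise (if ca.isEmpty then pvDefaultTable else ca) (fun k => k.1)
  generalize hgen : PySem.List.sorted (if ca.isEmpty then pvDefaultTable else ca) (fun k => k.1) = s at hs ⊢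
  rw [pv_bsearch_eq_countP s x hs 0 s.length le_rfl (Nat.zero_le _) List.countP_le_length]
  rw [pv_scan_eq_countP x s hs]
  by_cases h : s.countP (fun e => decide (e.1 ≤ x)) < s.length
  · rw [dif_pos h, if_pos h, List.getD_eq_getElem s (0,0) h]
  · rw [dif_neg h, if_neg h]
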